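-- pv_equiv track=rewrite | github.com/raopriyam/Leetcode-CTCI-Python | LongestCommonPrefixPractice 1.py | commonprefix3
-- ===== SOURCE A (Python) =====
-- def commonprefix3(arr1,arr2):
--     prefixset = set()
--
--     for i in arr1:
--         s1 = str(i)
--         for j in range(1,len(s1)+1):
--             prefixset.add(s1[:j])
--
--     best = 0
--
--     for i in arr2:
--         s2 = str(i)
--         for j in range(1,len(s2)+1):
--             if s2[:j] in prefixset:
--                 best = max(best,j)
--
--     return best
-- ===== SOURCE B (Python) =====
-- def commonprefix3(arr1, arr2):
--     strs1 = [str(i) for i in arr1]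
--     best = 0
--     for i in arr2:
--         s2 = str(i)
--         for s1 in strs1:
--             k = 0
--             while k < len(s1) and k < len(s2) and s1[k] == s2[k]:
--                 k += 1
--             if k > best:
--                 best = k
--     return best
-- ===== Notes on version B (the rewrite author's own statement) =====
-- stated objective: alternative
-- what changed: B drops A's hash-set of all prefixes of the arr1 strings entirely and instead computes, for each arr2 string against each arr1 string, their common-prefix length by a direct character-by-character scan, keeping the maximum.
import Mathlib
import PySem

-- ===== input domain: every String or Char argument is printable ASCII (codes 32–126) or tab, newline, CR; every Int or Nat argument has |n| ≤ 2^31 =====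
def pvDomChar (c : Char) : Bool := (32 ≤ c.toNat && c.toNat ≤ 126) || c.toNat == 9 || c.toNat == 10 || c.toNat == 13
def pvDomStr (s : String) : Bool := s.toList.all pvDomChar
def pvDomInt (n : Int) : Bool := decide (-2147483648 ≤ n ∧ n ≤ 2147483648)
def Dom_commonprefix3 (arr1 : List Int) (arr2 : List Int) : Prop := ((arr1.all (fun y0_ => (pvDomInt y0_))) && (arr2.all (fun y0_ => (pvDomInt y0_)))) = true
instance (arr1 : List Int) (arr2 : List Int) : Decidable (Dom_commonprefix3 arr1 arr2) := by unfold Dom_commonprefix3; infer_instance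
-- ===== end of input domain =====

-- B replaces A's hash-set of all arr1 string prefixes by a direct pairwise common-prefix-length
-- scan between each arr2 string and each arr1 string (objective: alternative algorithm, no set).

-- ===== PORT A =====
def commonprefix3 (arr1 : List Int) (arr2 : List Int) : Int :=
  let prefixset : PySem.Set String :=
    arr1.foldl (fun ps i =>
      let s1 := PySem.Int.toStr i
      (PySem.List.pyRange 1 (PySem.Str.len s1 + 1)).foldl
        (fun ps j => PySem.Set.add ps (PySem.Str.slice s1 none (some j))) ps)
      PySem.Set.empty
  arr2.foldl (fun best i =>
    let s2 := PySem.Int.toStr i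
    (PySem.List.pyRange 1 (PySem.Str.len s2 + 1)).foldl
      (fun best j =>
        if PySem.Set.contains prefixset (PySem.Str.slice s2 none (some j)) then max best j else best)
      best) 0

-- ===== PORT B =====
-- port of B's inner while loop 'while k < len(s1) and k < len(s2) and s1[k] == s2[k]: k += 1'
-- as the obvious structural recursion over the two char lists (exact: counts equal leading chars)
def lcpLen : List Char → List Char → Int
  | a :: as, b :: bs => if a = b then 1 + lcpLen as bs else 0
  | _, _ => 0

def commonprefix3_alt (arr1 : List Int) (arr2 : List Int) : Int :=
  let strs1 := arr1.map PySem.Int.toStr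
  arr2.foldl (fun best i =>
    let s2 := PySem.Int.toStr i
    strs1.foldl (fun best s1 =>
      let k := lcpLen s1.toList s2.toList
      if k > best then k else best) best) 0

-- ===== PRECONDITION & SPEC =====
def Spec_commonprefix3 (arr1 : List Int) (arr2 : List Int) (out : Int) : Prop := out = commonprefix3_alt arr1 arr2
instance (arr1 : List Int) (arr2 : List Int) (out : Int) : Decidable (Spec_commonprefix3 arr1 arr2 out) := by unfold Spec_commonprefix3; infer_instance

-- ===== CLAIM (what is proved, stated in full; the proofs are below) =====
def Claim_equal_commonprefix3 : Prop := ∀ (arr1 : List Int) (arr2 : List Int), Dom_commonprefix3 arr1 arr2 → Spec_commonprefix3 arr1 arr2 (commonprefix3 arr1 arr2)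

-- ===== LEMMAS AND PROOFS =====

-- the natural-number common-prefix length, and lcpLen computes it
def ncp : List Char → List Char → Nat
  | a :: as, b :: bs => if a = b then ncp as bs + 1 else 0
  | _, _ => 0

theorem lcpLen_eq_ncp (as bs : List Char) : lcpLen as bs = (ncp as bs : Int) := by
  induction as generalizing bs with
  | nil => cases bs <;> simp [lcpLen, ncp]
  | cons a as ih =>
    cases bs with
    | nil => simp [lcpLen, ncp]
    | cons b bs =>
      by_cases h : a = b <;> simp [lcpLen, ncp, h, ih] <;> ring

theorem ncp_le_left (as bs : List Char) : ncp as bs ≤ as.length := by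
  induction as generalizing bs with
  | nil => cases bs <;> simp [ncp]
  | cons a as ih =>
    cases bs with
    | nil => simp [ncp]
    | cons b bs => by_cases h : a = b <;> simp [ncp, h] <;> exact ih bs

theorem ncp_le_right (as bs : List Char) : ncp as bs ≤ bs.length := by
  induction as generalizing bs with
  | nil => cases bs <;> simp [ncp]
  | cons a as ih =>
    cases bs with
    | nil => simp [ncp]
    | cons b bs => by_cases h : a = b <;> simp [ncp, h] <;> exact ih bs

theorem take_ncp (as bs : List Char) : as.take (ncp as bs) = bs.take (ncp as bs) := by
  induction as generalizing bs with
  | nil => cases bs <;> simp [ncp]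
  | cons a as ih =>
    cases bs with
    | nil => simp [ncp]
    | cons b bs => by_cases h : a = b <;> simp [ncp, h, ih]

theorem le_ncp (as bs : List Char) (k : Nat) (h1 : k ≤ as.length) (h2 : k ≤ bs.length)
    (h : as.take k = bs.take k) : k ≤ ncp as bs := by
  induction as generalizing bs k with
  | nil => simp at h1; omega
  | cons a as ih =>
    cases bs with
    | nil => simp at h2; omega
    | cons b bs =>
      cases k with
      | zero => omega
      | succ k =>
        simp [List.take] at h h1 h2
        simp [ncp, h.1]
        have := ih bs k (by omega) (by omega) h.2
        omega

-- generic characterisation of A's inner fold shape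
theorem foldA_ge (l : List Int) (p : Int → Bool) (b : Int) :
    b ≤ l.foldl (fun a j => if p j then max a j else a) b := by
  induction l generalizing b with
  | nil => simp
  | cons x l ih =>
    refine le_trans ?_ (ih _)
    by_cases h : p x <;> simp [h] <;> omega

theorem foldA_ge_mem (l : List Int) (p : Int → Bool) (b : Int) (j : Int) :
    j ∈ l → p j = true → j ≤ l.foldl (fun a j => if p j then max a j else a) b := by
  induction l generalizing b with
  | nil => intro hj; simp at hj
  | cons x l ih =>
    intro hj hp
    rcases List.mem_cons.mp hj with h | h
    · subst h
      refine le_trans ?_ (foldA_ge l p _)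
      simp [hp]
    · exact ih _ h hp

theorem foldA_cases (l : List Int) (p : Int → Bool) (b : Int) :
    l.foldl (fun a j => if p j then max a j else a) b = b ∨
      ∃ j ∈ l, p j = true ∧ l.foldl (fun a j => if p j then max a j else a) b = j := by
  induction l generalizing b with
  | nil => left; rfl
  | cons x l ih =>
    have step : List.foldl (fun a j => if p j then max a j else a) b (x :: l)
        = List.foldl (fun a j => if p j then max a j else a) (if p x then max b x else b) l := rfl
    rcases ih (if p x then max b x else b) with h | ⟨j, hj, hp, h⟩
    · rw [step, h]
      by_cases hx : p x
      · rw [if_pos hx]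
        rcases max_choice b x with hm | hm
        · left; exact hm
        · right; exact ⟨x, List.mem_cons_self, hx, hm⟩
      · left; rw [if_neg hx]
    · right; exact ⟨j, List.mem_cons_of_mem _ hj, hp, by rw [step, h]⟩

-- generic characterisation of B's inner fold shape
theorem foldB_ge (l : List String) (g : String → Int) (b : Int) :
    b ≤ l.foldl (fun a x => let k := g x; if k > a then k else a) b := by
  induction l generalizing b with
  | nil => simp
  | cons x l ih =>
    refine le_trans ?_ (ih _)
    by_cases h : g x > b <;> simp [h] <;> omega

theorem foldB_ge_mem (l : List String) (g : String → Int) (b : Int) (x : String) :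
    x ∈ l → g x ≤ l.foldl (fun a x => let k := g x; if k > a then k else a) b := by
  induction l generalizing b with
  | nil => intro hx; simp at hx
  | cons y l ih =>
    intro hx
    rcases List.mem_cons.mp hx with h | h
    · subst h
      refine le_trans ?_ (foldB_ge l g _)
      by_cases h : g x > b <;> simp [h] <;> omega
    · exact ih _ h

theorem foldB_cases (l : List String) (g : String → Int) (b : Int) :
    l.foldl (fun a x => let k := g x; if k > a then k else a) b = b ∨
      ∃ x ∈ l, l.foldl (fun a x => let k := g x; if k > a then k else a) b = g x := by
  induction l generalizing b with
  | nil => left; rfl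
  | cons x l ih =>
    have step : List.foldl (fun a x => let k := g x; if k > a then k else a) b (x :: l)
        = List.foldl (fun a x => let k := g x; if k > a then k else a) (if g x > b then g x else b) l := rfl
    rcases ih (if g x > b then g x else b) with h | ⟨y, hy, h⟩
    · rw [step, h]
      by_cases hx : g x > b
      · right; exact ⟨x, List.mem_cons_self, by rw [if_pos hx]⟩
      · left; rw [if_neg hx]
    · right; exact ⟨y, List.mem_cons_of_mem _ hy, by rw [step, h]⟩

-- membership in a fold whose step adds elements described by Q
theorem mem_foldl_step {ι : Type} (l : List ι) (step : PySem.Set String → ι → PySem.Set String)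
    (Q : ι → String → Prop)
    (hstep : ∀ ps i x, x ∈ step ps i ↔ x ∈ ps ∨ Q i x) (s : PySem.Set String) (x : String) :
    x ∈ l.foldl step s ↔ x ∈ s ∨ ∃ i ∈ l, Q i x := by
  induction l generalizing s with
  | nil => simp
  | cons i l ih =>
    rw [List.foldl_cons, ih, hstep]
    constructor
    · rintro ((h | h) | ⟨i', hi', h⟩)
      · exact Or.inl h
      · exact Or.inr ⟨i, List.mem_cons_self, h⟩
      · exact Or.inr ⟨i', List.mem_cons_of_mem _ hi', h⟩
    · rintro (h | ⟨i', hi', h⟩)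
      · exact Or.inl (Or.inl h)
      · rcases List.mem_cons.mp hi' with rfl | hmem
        · exact Or.inl (Or.inr h)
        · exact Or.inr ⟨i', hmem, h⟩

-- A's prefix set, named for the proofs (definitionally the set built in the port)
def pset (arr1 : List Int) : PySem.Set String :=
  arr1.foldl (fun ps i =>
    (PySem.List.pyRange 1 (PySem.Str.len (PySem.Int.toStr i) + 1)).foldl
      (fun ps j => PySem.Set.add ps (PySem.Str.slice (PySem.Int.toStr i) none (some j))) ps)
    PySem.Set.empty

theorem mem_pset (arr1 : List Int) (x : String) :
    x ∈ pset arr1 ↔ ∃ i ∈ arr1, ∃ j : Int, 1 ≤ j ∧ j < PySem.Str.len (PySem.Int.toStr i) + 1 ∧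
      x = PySem.Str.slice (PySem.Int.toStr i) none (some j) := by
  have hinner : ∀ (i : Int) (ps : PySem.Set String) (x : String),
      x ∈ (PySem.List.pyRange 1 (PySem.Str.len (PySem.Int.toStr i) + 1)).foldl
        (fun ps j => PySem.Set.add ps (PySem.Str.slice (PySem.Int.toStr i) none (some j))) ps ↔
      x ∈ ps ∨ ∃ j : Int, 1 ≤ j ∧ j < PySem.Str.len (PySem.Int.toStr i) + 1 ∧
        x = PySem.Str.slice (PySem.Int.toStr i) none (some j) := by
    intro i ps x
    rw [mem_foldl_step _ _ (fun j x => x = PySem.Str.slice (PySem.Int.toStr i) none (some j))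
      (fun ps j x => PySem.Set.mem_add ps _ x)]
    constructor
    · rintro (h | ⟨j, hj, h⟩)
      · exact Or.inl h
      · exact Or.inr ⟨j, (PySem.List.mem_pyRange_one.mp hj).1, (PySem.List.mem_pyRange_one.mp hj).2, h⟩
    · rintro (h | ⟨j, h1, h2, h⟩)
      · exact Or.inl h
      · exact Or.inr ⟨j, PySem.List.mem_pyRange_one.mpr ⟨h1, h2⟩, h⟩
  unfold pset
  rw [mem_foldl_step _ _
    (fun i x => ∃ j : Int, 1 ≤ j ∧ j < PySem.Str.len (PySem.Int.toStr i) + 1 ∧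
      x = PySem.Str.slice (PySem.Int.toStr i) none (some j))
    (fun ps i x => hinner i ps x)]
  simp [PySem.Set.empty]

theorem slice_toList (s : String) (j : Int) (hj : 0 ≤ j) :
    (PySem.Str.slice s none (some j)).toList = s.toList.take j.toNat := by
  rw [PySem.Str.toList_slice, PySem.Chars.slice_eq_listSlice, PySem.List.slice_to _ hj]

-- A's inner scan over prefix lengths equals B's inner scan over arr1 strings
theorem contains_iff_mem (s : PySem.Set String) (x : String) :
    PySem.Set.contains s x = true ↔ x ∈ s := by
  simp [PySem.Set.contains]

theorem inner_eq (arr1 : List Int) (s2 : String) (b : Int) (hb : 0 ≤ b) :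
    (PySem.List.pyRange 1 (PySem.Str.len s2 + 1)).foldl
      (fun best j =>
        if PySem.Set.contains (pset arr1) (PySem.Str.slice s2 none (some j)) then max best j else best) b
    = (arr1.map PySem.Int.toStr).foldl
      (fun best s1 => let k := lcpLen s1.toList s2.toList; if k > best then k else best) b := by
  apply le_antisymm
  · rcases foldA_cases (PySem.List.pyRange 1 (PySem.Str.len s2 + 1))
      (fun j => PySem.Set.contains (pset arr1) (PySem.Str.slice s2 none (some j))) b with h | ⟨j, hj, hp, h⟩
    · rw [h]; exact foldB_ge _ _ _
    · rw [h]
      obtain ⟨h1, h2⟩ := PySem.List.mem_pyRange_one.mp hj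
      rw [PySem.Str.len_eq] at h2
      have hmem := (contains_iff_mem _ _).mp hp
      rw [mem_pset] at hmem
      obtain ⟨i, hi, j', hj'1, hj'2, heq⟩ := hmem
      rw [PySem.Str.len_eq] at hj'2
      have ht := congrArg String.toList heq
      rw [slice_toList _ _ (by omega), slice_toList _ _ (by omega)] at ht
      have hlen2 : j.toNat ≤ s2.toList.length := by omega
      have hlen1 : j'.toNat ≤ (PySem.Int.toStr i).toList.length := by omega
      have hjj' : j.toNat = j'.toNat := by
        have := congrArg List.length ht
        simp only [List.length_take] at this
        omega
      have hle : j.toNat ≤ ncp (PySem.Int.toStr i).toList s2.toList := by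
        apply le_ncp _ _ _ (by omega) hlen2
        rw [← hjj'] at ht
        exact ht.symm
      have hlcp : j ≤ lcpLen (PySem.Int.toStr i).toList s2.toList := by
        rw [lcpLen_eq_ncp]; omega
      exact le_trans hlcp (foldB_ge_mem _ _ _ _ (List.mem_map_of_mem hi))
  · rcases foldB_cases (arr1.map PySem.Int.toStr) (fun s1 => lcpLen s1.toList s2.toList) b with h | ⟨s1, hs1, h⟩
    · rw [h]; exact foldA_ge _ _ _
    · rw [h, lcpLen_eq_ncp]
      by_cases hk : ncp s1.toList s2.toList = 0
      · rw [hk]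
        exact le_trans (by omega) (foldA_ge _ _ _)
      · have hk1 : 1 ≤ ncp s1.toList s2.toList := Nat.one_le_iff_ne_zero.mpr hk
        have hkr := ncp_le_right s1.toList s2.toList
        have hkl := ncp_le_left s1.toList s2.toList
        obtain ⟨i, hi, rfl⟩ := List.mem_map.mp hs1
        have hjmem : ((ncp (PySem.Int.toStr i).toList s2.toList : Nat) : Int) ∈
            PySem.List.pyRange 1 (PySem.Str.len s2 + 1) := by
          rw [PySem.List.mem_pyRange_one, PySem.Str.len_eq]
          omega
        have hp : PySem.Set.contains (pset arr1)
            (PySem.Str.slice s2 none (some ((ncp (PySem.Int.toStr i).toList s2.toList : Nat) : Int))) = true := by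
          rw [contains_iff_mem, mem_pset]
          refine ⟨i, hi, ((ncp (PySem.Int.toStr i).toList s2.toList : Nat) : Int), by omega, ?_, ?_⟩
          · rw [PySem.Str.len_eq]; omega
          · apply String.toList_inj.mp
            rw [slice_toList _ _ (by omega), slice_toList _ _ (by omega)]
            simp only [Int.toNat_natCast]
            exact (take_ncp _ _).symm
        exact foldA_ge_mem _ _ _ _ hjmem hp

theorem outer_eq (arr1 arr2 : List Int) (b : Int) (hb : 0 ≤ b) :
    arr2.foldl (fun best i =>
      (PySem.List.pyRange 1 (PySem.Str.len (PySem.Int.toStr i) + 1)).foldl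
        (fun best j =>
          if PySem.Set.contains (pset arr1) (PySem.Str.slice (PySem.Int.toStr i) none (some j))
          then max best j else best) best) b
    = arr2.foldl (fun best i =>
      (arr1.map PySem.Int.toStr).foldl
        (fun best s1 => let k := lcpLen s1.toList (PySem.Int.toStr i).toList;
          if k > best then k else best) best) b := by
  induction arr2 generalizing b with
  | nil => rfl
  | cons i t ih =>
    rw [List.foldl_cons, List.foldl_cons, inner_eq arr1 (PySem.Int.toStr i) b hb]
    exact ih _ (le_trans hb (by rw [← inner_eq arr1 (PySem.Int.toStr i) b hb]; exact foldA_ge _ _ _))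

-- ===== VERDICT (by name: the statement is the Claim_ definition above) =====
theorem commonprefix3_spec : Claim_equal_commonprefix3 := by
  intro arr1 arr2 _
  unfold Spec_commonprefix3 commonprefix3 commonprefix3_alt
  exact outer_eq arr1 arr2 0 le_rfl
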